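-- pv_equiv track=rewrite | github.com/tac0turtle/ai-learning | experiments/prompt-proxy/transforms.py | zone_split
-- ===== SOURCE A (Python) =====
-- def split_into_turns(messages: list[dict]) -> list[list[dict]]:
--     """Group messages into turns. A turn boundary is each user message."""
--     turns: list[list[dict]] = []
--     current: list[dict] = []
--     for msg in messages:
--         if msg.get("role") == "user" and current:
--             turns.append(current)
--             current = []
--         current.append(msg)
--     if current:
--         turns.append(current)
--     return turns
--
-- def zone_split(
--     messages: list[dict],
--     frozen_turns: int = 2,
--     hot_turns: int = 4,
-- ) -> tuple[list[dict], list[dict], list[dict]]: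
--     """Split messages into frozen, middle, and hot zones.
--
--     - Frozen prefix: never modified (cache stability).
--     - Hot window: never modified (recent working memory).
--     - Middle: compressible.
--     """
--     turns = split_into_turns(messages)
--     total = len(turns)
--
--     if total <= frozen_turns + hot_turns:
--         return messages, [], []
--
--     frozen_msgs = [m for t in turns[:frozen_turns] for m in t]
--     hot_msgs = [m for t in turns[total - hot_turns :] for m in t]
--     middle_msgs = [m for t in turns[frozen_turns : total - hot_turns] for m in t]
--     return frozen_msgs, middle_msgs, hot_msgs
-- ===== SOURCE B (Python) =====
-- def zone_split(messages, frozen_turns=2, hot_turns=4):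
--     # Boundary-index decomposition: compute the flat start index of each turn
--     # and slice the flat message list once, instead of building nested turn
--     # lists and flattening them back.
--     starts = [i for i, m in enumerate(messages)
--               if i == 0 or m.get("role") == "user"]
--     total = len(starts)
--     if total <= frozen_turns + hot_turns:
--         return messages, [], []
--
--     def cut(k):
--         # message index of turn boundary k, with Python slice normalization
--         if k < 0:
--             k += total
--         k = max(0, min(k, total))
--         return starts[k] if k < total else len(messages)
--
--     f = cut(frozen_turns)
--     h = cut(total - hot_turns)
--     return messages[:f], messages[f:h], messages[h:]
-- ===== Notes on version B (the rewrite author's own statement) =====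
-- stated objective: alternative
-- what changed: B computes the flat start index of each turn boundary once (enumerate + filter) and returns three direct slices of the flat message list, instead of building nested per-turn lists and re-flattening them with three comprehensions.
import Mathlib
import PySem

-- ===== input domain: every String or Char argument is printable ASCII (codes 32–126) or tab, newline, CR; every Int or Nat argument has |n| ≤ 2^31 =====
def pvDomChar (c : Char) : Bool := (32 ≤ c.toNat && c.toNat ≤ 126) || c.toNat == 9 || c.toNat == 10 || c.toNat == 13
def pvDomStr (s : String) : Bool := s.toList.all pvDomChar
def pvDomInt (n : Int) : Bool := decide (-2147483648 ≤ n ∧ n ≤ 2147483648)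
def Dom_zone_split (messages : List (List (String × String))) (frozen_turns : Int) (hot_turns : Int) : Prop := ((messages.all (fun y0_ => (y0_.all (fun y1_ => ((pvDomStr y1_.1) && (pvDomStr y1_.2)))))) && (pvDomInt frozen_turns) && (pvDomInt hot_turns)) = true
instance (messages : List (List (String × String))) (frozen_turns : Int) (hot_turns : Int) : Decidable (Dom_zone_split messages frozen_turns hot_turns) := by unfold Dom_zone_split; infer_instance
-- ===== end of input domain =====

-- B replaces the nested turn lists and three flatten comprehensions by computing the flat
-- boundary index of each turn once and slicing the flat message list directly (objective:
-- alternative decomposition, same asymptotic cost).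

-- ===== PORT A =====
-- helper of A: split_into_turns (the for-loop as a foldl over (turns, current))
def split_into_turns (messages : List (List (String × String))) :
    List (List (List (String × String))) :=
  let st := messages.foldl
    (fun (st : List (List (List (String × String))) × List (List (String × String))) msg =>
      let st :=
        if PySem.Dict.get? (PySem.Dict.mk msg) "role" == some "user" && !st.2.isEmpty then
          (st.1 ++ [st.2], ([] : List (List (String × String))))
        else st
      (st.1, st.2 ++ [msg]))
    ([], [])
  if !st.2.isEmpty then st.1 ++ [st.2] else st.1

def zone_split (messages : List (List (String × String))) (frozen_turns : Int) (hot_turns : Int) :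
    (List (List (String × String))) × (List (List (String × String))) × (List (List (String × String))) :=
  let turns := split_into_turns messages
  let total : Int := turns.length
  if total ≤ frozen_turns + hot_turns then
    (messages, [], [])
  else
    let frozen_msgs := (PySem.List.slice turns none (some frozen_turns)).flatten
    let hot_msgs := (PySem.List.slice turns (some (total - hot_turns)) none).flatten
    let middle_msgs := (PySem.List.slice turns (some frozen_turns) (some (total - hot_turns))).flatten
    (frozen_msgs, middle_msgs, hot_msgs)

-- ===== PORT B =====
def zone_split_alt (messages : List (List (String × String))) (frozen_turns : Int) (hot_turns : Int) :
    (List (List (String × String))) × (List (List (String × String))) × (List (List (String × String))) :=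
  let starts : List Int :=
    ((PySem.List.enumerate messages).filter
      (fun im => im.1 == 0 || PySem.Dict.get? (PySem.Dict.mk im.2) "role" == some "user")).map (·.1)
  let total : Int := starts.length
  if total ≤ frozen_turns + hot_turns then
    (messages, [], [])
  else
    let cut : Int → Int := fun k =>
      let k1 := if k < 0 then k + total else k
      let k2 := max 0 (min k1 total)
      if k2 < total then (PySem.List.pyGet? starts k2).getD 0 else (messages.length : Int)
    let f := cut frozen_turns
    let h := cut (total - hot_turns)
    (PySem.List.slice messages none (some f),
     PySem.List.slice messages (some f) (some h),
     PySem.List.slice messages (some h) none)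

-- ===== PRECONDITION & SPEC =====
def Spec_zone_split (messages : List (List (String × String))) (frozen_turns : Int) (hot_turns : Int) (out : (List (List (String × String))) × (List (List (String × String))) × (List (List (String × String)))) : Prop := out = zone_split_alt messages frozen_turns hot_turns
instance (messages : List (List (String × String))) (frozen_turns : Int) (hot_turns : Int) (out : (List (List (String × String))) × (List (List (String × String))) × (List (List (String × String)))) : Decidable (Spec_zone_split messages frozen_turns hot_turns out) := by unfold Spec_zone_split; infer_instance

-- ===== CLAIM (what is proved, stated in full; the proofs are below) =====
def Claim_equal_zone_split : Prop := ∀ (messages : List (List (String × String))) (frozen_turns : Int) (hot_turns : Int), Dom_zone_split messages frozen_turns hot_turns → Spec_zone_split messages frozen_turns hot_turns (zone_split messages frozen_turns hot_turns)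

-- ===== LEMMAS AND PROOFS =====

-- abbreviation used only in the proofs
def pvUser (msg : List (String × String)) : Bool :=
  PySem.Dict.get? (PySem.Dict.mk msg) "role" == some "user"

-- the grouping loop of A, as structural recursion (cur is the current turn, nonempty)
def pvGo (cur : List (List (String × String))) :
    List (List (String × String)) → List (List (List (String × String)))
  | [] => [cur]
  | m :: ms => if pvUser m then cur :: pvGo [m] ms else pvGo (cur ++ [m]) ms

def pvTurns : List (List (String × String)) → List (List (List (String × String)))
  | [] => []
  | m :: ms => pvGo [m] ms

-- indices (as offsets) of user messages
def pvUserIdx : List (List (String × String)) → List Int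
  | [] => []
  | m :: ms => (if pvUser m then [(0 : Int)] else []) ++ (pvUserIdx ms).map (· + 1)

-- start offset of each group of a list of groups
def pvOffs : List (List (List (String × String))) → List Int
  | [] => []
  | t :: ts => 0 :: (pvOffs ts).map (· + (t.length : Int))

def pvStep (st : List (List (List (String × String))) × List (List (String × String)))
    (msg : List (String × String)) :
    List (List (List (String × String))) × List (List (String × String)) :=
  let st :=
    if PySem.Dict.get? (PySem.Dict.mk msg) "role" == some "user" && !st.2.isEmpty then
      (st.1 ++ [st.2], ([] : List (List (String × String))))
    else st
  (st.1, st.2 ++ [msg])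

theorem pvStep_user {m : List (String × String)} (hu : pvUser m = true)
    (ts : List (List (List (String × String)))) (cur : List (List (String × String)))
    (hcur : cur ≠ []) : pvStep (ts, cur) m = (ts ++ [cur], [m]) := by
  simp only [pvUser] at hu
  simp [pvStep, hu, hcur]

theorem pvGo_loop (ms : List (List (String × String)))
    (ts : List (List (List (String × String)))) (cur : List (List (String × String)))
    (hcur : cur ≠ []) :
    (let st := ms.foldl pvStep (ts, cur)
      if !st.2.isEmpty then st.1 ++ [st.2] else st.1) = ts ++ pvGo cur ms := by
  induction ms generalizing ts cur with
  | nil => simp [pvGo, hcur]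
  | cons m ms ih =>
    rw [List.foldl_cons]
    by_cases hu : pvUser m = true
    · rw [pvStep_user hu ts cur hcur]
      rw [ih (ts ++ [cur]) [m] (by simp)]
      simp [pvGo, hu]
    · have hu' : pvUser m = false := by simpa using hu
      have hstep : pvStep (ts, cur) m = (ts, cur ++ [m]) := by
        simp only [pvUser] at hu'
        simp [pvStep, hu']
      rw [hstep, ih ts (cur ++ [m]) (by simp)]
      simp [pvGo, hu']

theorem split_eq (messages : List (List (String × String))) :
    split_into_turns messages = pvTurns messages := by
  have hdef : split_into_turns messages =
      (let st := messages.foldl pvStep ([], [])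
        if !st.2.isEmpty then st.1 ++ [st.2] else st.1) := rfl
  rw [hdef]
  cases messages with
  | nil => rfl
  | cons m ms =>
    rw [List.foldl_cons]
    have hstep : pvStep ([], []) m = ([], [m]) := by simp [pvStep]
    rw [hstep]
    exact pvGo_loop ms [] [m] (by simp)

theorem pvUserIdx_enum (ms : List (List (String × String))) (s : Int) (hs : 0 < s) :
    ((PySem.List.enumerate ms s).filter
      (fun im => im.1 == 0 || PySem.Dict.get? (PySem.Dict.mk im.2) "role" == some "user")).map (·.1)
      = (pvUserIdx ms).map (· + s) := by
  induction ms generalizing s with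
  | nil => simp [PySem.List.enumerate_nil, pvUserIdx]
  | cons m ms ih =>
    rw [PySem.List.enumerate_cons]
    have hs0 : (s == (0:Int)) = false := by simp; omega
    rw [List.filter_cons]
    by_cases hu : pvUser m
    · simp only [pvUser] at hu
      simp only [hs0, hu, Bool.false_or, if_pos, pvUserIdx]
      rw [List.map_cons, ih (s+1) (by omega)]
      simp only [pvUser, hu, if_pos, List.map_map, List.singleton_append, List.map_cons]
      refine List.cons_eq_cons.mpr ⟨by omega, ?_⟩
      simp only [Function.comp_def]
      apply List.map_congr_left
      intro a _
      omega
    · simp only [pvUser] at hu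
      rw [Bool.not_eq_true] at hu
      simp only [hs0, hu, Bool.false_or, Bool.false_eq_true, if_false, pvUserIdx]
      rw [ih (s+1) (by omega)]
      simp only [pvUser, hu, Bool.false_eq_true, if_false, List.nil_append, List.map_map]
      simp only [Function.comp_def]
      apply List.map_congr_left
      intro a _
      omega

theorem pvOffs_go (ms : List (List (String × String))) (cur : List (List (String × String)))
    (hcur : cur ≠ []) :
    pvOffs (pvGo cur ms) = 0 :: (pvUserIdx ms).map (· + (cur.length : Int)) := by
  induction ms generalizing cur with
  | nil => simp [pvGo, pvOffs, pvUserIdx]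
  | cons m ms ih =>
    by_cases hu : pvUser m
    · rw [pvGo, if_pos hu]
      rw [pvOffs, ih [m] (by simp), pvUserIdx]
      simp only [hu, if_pos, List.singleton_append, List.map_cons, List.map_map, List.length_cons]
      refine List.cons_eq_cons.mpr ⟨rfl, List.cons_eq_cons.mpr ⟨rfl, ?_⟩⟩
      simp only [Function.comp_def]
      apply List.map_congr_left
      intro a _
      push_cast [List.length_nil, List.length_cons]
      omega
    · rw [pvGo, if_neg (by simpa using hu)]
      rw [ih (cur ++ [m]) (by simp), pvUserIdx]
      rw [Bool.not_eq_true] at hu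
      simp only [hu, Bool.false_eq_true, if_false, List.nil_append, List.map_map, List.length_append]
      refine List.cons_eq_cons.mpr ⟨rfl, ?_⟩
      simp only [Function.comp_def]
      apply List.map_congr_left
      intro a _
      push_cast [List.length_nil, List.length_cons]
      omega

theorem pvStarts_eq (messages : List (List (String × String))) :
    ((PySem.List.enumerate messages).filter
      (fun im => im.1 == 0 || PySem.Dict.get? (PySem.Dict.mk im.2) "role" == some "user")).map (·.1)
      = pvOffs (pvTurns messages) := by
  cases messages with
  | nil => simp [PySem.List.enumerate_nil, pvTurns, pvOffs]
  | cons m ms =>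
    show ((PySem.List.enumerate (m :: ms) 0).filter _).map _ = _
    rw [PySem.List.enumerate_cons, List.filter_cons]
    simp only [show ((0:Int) == 0) = true from rfl, Bool.true_or, if_pos, List.map_cons]
    rw [pvUserIdx_enum ms (0+1) (by omega)]
    rw [pvTurns, pvOffs_go ms [m] (by simp)]
    simp

theorem pvOffs_getElem? (l : List (List (List (String × String)))) (j : Nat) (hj : j < l.length) :
    (pvOffs l)[j]? = some (((l.take j).flatten.length : Int)) := by
  induction l generalizing j with
  | nil => simp at hj
  | cons t ts ih =>
    cases j with
    | zero => simp [pvOffs]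
    | succ j =>
      rw [pvOffs, List.getElem?_cons_succ, List.getElem?_map, ih j (by simpa using hj)]
      simp only [Option.map_some, List.take_succ_cons, List.flatten_cons, List.length_append]
      refine congrArg some ?_
      push_cast [List.length_nil, List.length_cons]
      omega

theorem pvFlatten_split (l : List (List (List (String × String)))) (j : Nat) :
    l.flatten = (l.take j).flatten ++ (l.drop j).flatten := by
  rw [← List.flatten_append, List.take_append_drop]

theorem pvFlatten_take (l : List (List (List (String × String)))) (j : Nat) :
    (l.take j).flatten = l.flatten.take ((l.take j).flatten.length) := by
  rw [pvFlatten_split l j]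
  simp

theorem pvFlatten_drop (l : List (List (List (String × String)))) (j : Nat) :
    (l.drop j).flatten = l.flatten.drop ((l.take j).flatten.length) := by
  rw [pvFlatten_split l j]
  simp

theorem pvPrefLen_le (l : List (List (List (String × String)))) (j : Nat) :
    (l.take j).flatten.length ≤ l.flatten.length := by
  have h2 := congrArg List.length (pvFlatten_split l j)
  rw [List.length_append] at h2
  omega

theorem pvPrefLen_mono (l : List (List (List (String × String)))) {i j : Nat} (h : i ≤ j) :
    (l.take i).flatten.length ≤ (l.take j).flatten.length := by
  have h1 : l.take i = (l.take j).take i := by rw [List.take_take, Nat.min_eq_left h]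
  rw [h1]
  exact pvPrefLen_le (l.take j) i

theorem pvFlatten_mid (l : List (List (List (String × String)))) (i j : Nat) (h : i ≤ j) :
    ((l.drop i).take (j - i)).flatten
      = (l.flatten.drop ((l.take i).flatten.length)).take
          ((l.take j).flatten.length - (l.take i).flatten.length) := by
  have h1 : (l.drop i).take (j - i) = (l.take j).drop i := (List.drop_take ..).symm
  have h2 : (l.take j).take i = l.take i := by rw [List.take_take, Nat.min_eq_left h]
  rw [h1, pvFlatten_drop (l.take j) i, h2]
  conv_lhs => rw [pvFlatten_take l j]
  rw [List.drop_take]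

theorem pvGo_flatten (ms : List (List (String × String))) (cur : List (List (String × String))) :
    (pvGo cur ms).flatten = cur ++ ms := by
  induction ms generalizing cur with
  | nil => simp [pvGo]
  | cons m ms ih =>
    by_cases hu : pvUser m
    · simp [pvGo, hu, ih]
    · simp [pvGo, hu, ih]

theorem pvTurns_flatten (messages : List (List (String × String))) :
    (pvTurns messages).flatten = messages := by
  cases messages with
  | nil => rfl
  | cons m ms => simp [pvTurns, pvGo_flatten]

theorem pvOffs_length (l : List (List (List (String × String)))) :
    (pvOffs l).length = l.length := by
  induction l with
  | nil => rfl
  | cons t ts ih => simp [pvOffs, ih]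

theorem pvCut_eq (l : List (List (List (String × String)))) (k : Int) :
    (if max 0 (min (if k < 0 then k + (l.length : Int) else k) (l.length : Int))
          < (l.length : Int) then
        (PySem.List.pyGet? (pvOffs l)
          (max 0 (min (if k < 0 then k + (l.length : Int) else k) (l.length : Int)))).getD 0
      else (l.flatten.length : Int))
    = ((l.take (PySem.List.clampIdx l.length k)).flatten.length : Int) := by
  have hn : (pvOffs l).length = l.length := pvOffs_length l
  have hk2 : max 0 (min (if k < 0 then k + (l.length : Int) else k) (l.length : Int))
      = ((PySem.List.clampIdx l.length k : Nat) : Int) := by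
    simp only [PySem.List.clampIdx]
    split_ifs <;> push_cast <;> omega
  rw [hk2]
  by_cases hc : PySem.List.clampIdx l.length k < l.length
  · rw [if_pos (by exact_mod_cast hc)]
    rw [PySem.List.pyGet?_natCast, pvOffs_getElem? l _ (hn ▸ hc)]
    rfl
  · have hle : PySem.List.clampIdx l.length k ≤ l.length := by
      simp only [PySem.List.clampIdx]
      split_ifs <;> omega
    have hceq : PySem.List.clampIdx l.length k = l.length := by omega
    rw [if_neg (by intro h; exact hc (by exact_mod_cast h)), hceq, List.take_length]

-- ===== VERDICT (by name: the statement is the Claim_ definition above) =====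
theorem zone_split_spec : Claim_equal_zone_split := by
  intro messages F H _
  unfold Spec_zone_split zone_split zone_split_alt
  rw [split_eq, pvStarts_eq]
  set T := pvTurns messages with hT
  have hflat : T.flatten = messages := pvTurns_flatten messages
  rw [← hflat]
  simp only [pvOffs_length]
  rw [pvCut_eq T F, pvCut_eq T ((T.length : Int) - H)]
  split_ifs with hg
  · rfl
  · refine Prod.ext ?_ (Prod.ext ?_ ?_)
    · -- frozen zone
      show (PySem.List.slice T none (some F)).flatten
          = PySem.List.slice T.flatten none
              (some ((T.take (PySem.List.clampIdx T.length F)).flatten.length : Int))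
      rw [PySem.List.slice_to T.flatten (Int.natCast_nonneg _), Int.toNat_natCast]
      have hL : PySem.List.slice T none (some F)
          = T.take (PySem.List.clampIdx T.length F) := by
        simp [PySem.List.slice]
      rw [hL, ← pvFlatten_take]
    · -- middle zone
      show (PySem.List.slice T (some F) (some ((T.length : Int) - H))).flatten
          = PySem.List.slice T.flatten
              (some ((T.take (PySem.List.clampIdx T.length F)).flatten.length : Int))
              (some ((T.take (PySem.List.clampIdx T.length ((T.length : Int) - H))).flatten.length : Int))
      rw [PySem.List.slice_toNat T.flatten (Int.natCast_nonneg _) (Int.natCast_nonneg _),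
        Int.toNat_natCast, Int.toNat_natCast]
      have hL : PySem.List.slice T (some F) (some ((T.length : Int) - H))
          = (T.drop (PySem.List.clampIdx T.length F)).take
              (PySem.List.clampIdx T.length ((T.length : Int) - H)
                - PySem.List.clampIdx T.length F) := by
        simp [PySem.List.slice]
      rw [hL]
      by_cases hij : PySem.List.clampIdx T.length F
          ≤ PySem.List.clampIdx T.length ((T.length : Int) - H)
      · exact pvFlatten_mid T _ _ hij
      · have h0 : PySem.List.clampIdx T.length ((T.length : Int) - H)
            - PySem.List.clampIdx T.length F = 0 := by omega
        have hm : (T.take (PySem.List.clampIdx T.length ((T.length : Int) - H))).flatten.length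
            ≤ (T.take (PySem.List.clampIdx T.length F)).flatten.length :=
          pvPrefLen_mono T (by omega)
        rw [h0, Nat.sub_eq_zero_of_le hm]
        simp
    · -- hot zone
      show (PySem.List.slice T (some ((T.length : Int) - H)) none).flatten
          = PySem.List.slice T.flatten
              (some ((T.take (PySem.List.clampIdx T.length ((T.length : Int) - H))).flatten.length : Int)) none
      rw [PySem.List.slice_some_none T _, PySem.List.slice_from T.flatten (Int.natCast_nonneg _),
        Int.toNat_natCast, pvFlatten_drop]
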